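-- pv_equiv track=rewrite | github.com/docxology/aif_iwai2025_thoughtseeds | utils/exporters/r_exporter.py | _calculate_state_durations
-- ===== SOURCE A (Python) =====
-- from typing import Dict, Any, Optional, List
--
-- def _calculate_state_durations(state_history: List[str], target_state: str) -> List[int]:
--     """Calculate durations for each occurrence of a specific state."""
--     durations = []
--     current_duration = 0
--
--     for state in state_history:
--         if state == target_state:
--             current_duration += 1
--         else:
--             if current_duration > 0:
--                 durations.append(current_duration)
--                 current_duration = 0
--
--     # Add final duration if simulation ended in target state
--     if current_duration > 0:
--         durations.append(current_duration)
--
--     return durations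
-- ===== SOURCE B (Python) =====
-- from itertools import groupby
-- from typing import List
--
--
-- def _calculate_state_durations(state_history: List[str], target_state: str) -> List[int]:
--     """Group the history into consecutive runs and measure the target-state runs."""
--     return [sum(1 for _ in group)
--             for key, group in groupby(state_history)
--             if key == target_state]
-- ===== Notes on version B (the rewrite author's own statement) =====
-- stated objective: idiomatic
-- what changed: Replaces the running-counter state machine with end-of-loop flush by itertools.groupby partitioning the history into consecutive runs, keeping the runs whose key is the target and measuring their lengths.
import Mathlib
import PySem

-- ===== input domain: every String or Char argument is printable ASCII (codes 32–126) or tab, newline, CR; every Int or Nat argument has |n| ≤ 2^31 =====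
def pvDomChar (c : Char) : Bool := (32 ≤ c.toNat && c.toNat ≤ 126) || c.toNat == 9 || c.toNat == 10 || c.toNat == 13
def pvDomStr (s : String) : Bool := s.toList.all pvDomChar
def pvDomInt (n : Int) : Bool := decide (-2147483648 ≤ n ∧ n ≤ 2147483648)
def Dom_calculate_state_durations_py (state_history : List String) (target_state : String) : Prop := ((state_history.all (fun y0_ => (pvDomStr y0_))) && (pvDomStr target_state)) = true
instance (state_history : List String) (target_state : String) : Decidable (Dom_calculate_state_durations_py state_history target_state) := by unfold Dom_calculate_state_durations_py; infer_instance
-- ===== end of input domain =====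

-- B replaces A's running-counter state machine (with its end-of-loop flush) by grouping the
-- history into consecutive runs and measuring the runs whose key is the target (idiomatic).

-- ===== PORT A =====
-- the for-loop of A: state is (durations, current_duration), branches in A's order
def pyLoopA (target : String) : List String → List Int → Int → List Int × Int
  | [], durations, current => (durations, current)
  | s :: rest, durations, current =>
    if s == target then
      pyLoopA target rest durations (current + 1)
    else
      if current > 0 then pyLoopA target rest (durations ++ [current]) 0
      else pyLoopA target rest durations current

def calculate_state_durations_py (state_history : List String) (target_state : String) : List Int :=
  let r := pyLoopA target_state state_history [] 0
  if r.2 > 0 then r.1 ++ [r.2] else r.1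

-- ===== PORT B =====
-- groupby: the list of (key, run-length) pairs of consecutive runs
def pyGroups : List String → List (String × Int)
  | [] => []
  | x :: xs =>
    (x, ((xs.takeWhile (fun y => y == x)).length : Int) + 1)
      :: pyGroups (xs.dropWhile (fun y => y == x))
termination_by l => l.length
decreasing_by
  have := List.length_dropWhile_le (fun y => y == x) xs
  simp; omega

def calculate_state_durations_py_alt (state_history : List String) (target_state : String) : List Int :=
  ((pyGroups state_history).filter (fun p => p.1 == target_state)).map (fun p => p.2)

-- ===== PRECONDITION & SPEC =====
def Spec_calculate_state_durations_py (state_history : List String) (target_state : String) (out : List Int) : Prop := out = calculate_state_durations_py_alt state_history target_state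
instance (state_history : List String) (target_state : String) (out : List Int) : Decidable (Spec_calculate_state_durations_py state_history target_state out) := by unfold Spec_calculate_state_durations_py; infer_instance

-- ===== CLAIM (what is proved, stated in full; the proofs are below) =====
def Claim_equal_calculate_state_durations_py : Prop := ∀ (state_history : List String) (target_state : String), Dom_calculate_state_durations_py state_history target_state → Spec_calculate_state_durations_py state_history target_state (calculate_state_durations_py state_history target_state)

-- ===== LEMMAS AND PROOFS =====

-- A's loop followed by the final flush, as one helper
def finishA (t : String) (l : List String) (d : List Int) (c : Int) : List Int :=
  let r := pyLoopA t l d c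
  if r.2 > 0 then r.1 ++ [r.2] else r.1

theorem finishA_eq (l : List String) (t : String) :
    calculate_state_durations_py l t = finishA t l [] 0 := rfl

-- the durations accumulator factors out
theorem finishA_acc (t : String) :
    ∀ (l : List String) (d : List Int) (c : Int),
      finishA t l d c = d ++ finishA t l [] c := by
  intro l
  induction l with
  | nil =>
    intro d c
    simp only [finishA, pyLoopA]
    split_ifs <;> simp
  | cons x xs ih =>
    intro d c
    by_cases hx : x == t
    · simp only [finishA, pyLoopA, hx, if_pos]
      exact ih d (c + 1)
    · by_cases hc : c > 0
      · have s1 : ∀ d' : List Int, finishA t (x :: xs) d' c = finishA t xs (d' ++ [c]) 0 := by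
          intro d'; simp [finishA, pyLoopA, hx, hc]
        rw [s1 d, s1 [], ih (d ++ [c]) 0, ih ([] ++ [c]) 0]
        simp
      · simp only [finishA, pyLoopA, hx, Bool.false_eq_true, if_false, hc]
        exact ih d c

theorem pyGroups_cons (x : String) (xs : List String) :
    pyGroups (x :: xs) =
      (x, ((xs.takeWhile (fun y => y == x)).length : Int) + 1)
        :: pyGroups (xs.dropWhile (fun y => y == x)) := by
  rw [pyGroups]

-- dropping a non-target head does not change B's result
theorem alt_cons_ne (x t : String) (xs : List String) (hx : ¬ x = t) :
    calculate_state_durations_py_alt (x :: xs) t = calculate_state_durations_py_alt xs t := by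
  cases xs with
  | nil => simp [calculate_state_durations_py_alt, pyGroups_cons, pyGroups, hx]
  | cons y ys =>
    by_cases hy : y = x
    · subst hy
      simp [calculate_state_durations_py_alt, pyGroups_cons, List.takeWhile, List.dropWhile, hx]
    · have hyb : (y == x) = false := by simpa using hy
      have ht : (y :: ys).takeWhile (fun z => z == x) = [] := by
        simp [List.takeWhile, hyb]
      have hd : (y :: ys).dropWhile (fun z => z == x) = y :: ys := by
        simp [List.dropWhile, hyb]
      simp [calculate_state_durations_py_alt, pyGroups_cons, ht, hd, hx]

-- main invariant: P(l) = A-with-fresh-counter equals B;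
-- Q(l) = A with a positive running counter c emits c plus the leading target run, then B on the rest
theorem main_inv (t : String) :
    ∀ (n : ℕ) (l : List String), l.length ≤ n →
      (finishA t l [] 0 = calculate_state_durations_py_alt l t) ∧
      (∀ c : Int, 0 < c →
        finishA t l [] c =
          (c + ((l.takeWhile (fun y => y == t)).length : Int))
            :: calculate_state_durations_py_alt (l.dropWhile (fun y => y == t)) t) := by
  intro n
  induction n with
  | zero =>
    intro l hl
    have : l = [] := List.eq_nil_of_length_eq_zero (Nat.le_zero.mp hl)
    subst this
    constructor
    · simp [finishA, pyLoopA, calculate_state_durations_py_alt, pyGroups]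
    · intro c hc
      simp [finishA, pyLoopA, hc, calculate_state_durations_py_alt, pyGroups]
  | succ n ih =>
    intro l hl
    cases l with
    | nil =>
      constructor
      · simp [finishA, pyLoopA, calculate_state_durations_py_alt, pyGroups]
      · intro c hc
        simp [finishA, pyLoopA, hc, calculate_state_durations_py_alt, pyGroups]
    | cons x xs =>
      have hxs : xs.length ≤ n := by simpa using hl
      have ihx := ih xs hxs
      by_cases hx : x = t
      · subst hx
        constructor
        · -- fresh counter, head is the target: enter Q with c = 1
          have step : finishA x (x :: xs) [] 0 = finishA x xs [] 1 := by
            simp [finishA, pyLoopA]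
          rw [step, ihx.2 1 (by norm_num)]
          simp [calculate_state_durations_py_alt, pyGroups_cons]
          ring
        · intro c hc
          have step : finishA x (x :: xs) [] c = finishA x xs [] (c + 1) := by
            simp [finishA, pyLoopA]
          rw [step, ihx.2 (c + 1) (by omega)]
          simp [List.takeWhile, List.dropWhile]
          ring
      · have hxb : (x == t) = false := by simpa using hx
        constructor
        · -- fresh counter, head not target: skip it
          have step : finishA t (x :: xs) [] 0 = finishA t xs [] 0 := by
            simp [finishA, pyLoopA, hxb]
          rw [step, ihx.1, alt_cons_ne x t xs hx]
        · intro c hc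
          -- positive counter, head not target: flush c, restart fresh
          have step : finishA t (x :: xs) [] c = finishA t xs [c] 0 := by
            simp [finishA, pyLoopA, hxb, hc]
          rw [step, finishA_acc t xs [c] 0, ihx.1]
          have ht : (x :: xs).takeWhile (fun y => y == t) = [] := by
            simp [List.takeWhile, hxb]
          have hd : (x :: xs).dropWhile (fun y => y == t) = x :: xs := by
            simp [List.dropWhile, hxb]
          rw [ht, hd, alt_cons_ne x t xs hx]
          simp

-- ===== VERDICT (by name: the statement is the Claim_ definition above) =====
theorem calculate_state_durations_py_spec : Claim_equal_calculate_state_durations_py := by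
  intro l t _
  show calculate_state_durations_py l t = calculate_state_durations_py_alt l t
  rw [finishA_eq]
  exact (main_inv t l.length l le_rfl).1
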